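-- pv_equiv track=rewrite | github.com/newma87/Spider | spider.py | calcPriority
-- ===== SOURCE A (Python) =====
-- def calcPriority(dist_url, src_url):
-- 	dist = dist_url.split('/')
-- 	src = src_url.split('/')
--
-- 	dist_len = len(dist)
-- 	src_len = len(src)
-- 	priority = dist_len
--
-- 	addition = 0
-- 	for d in dist:
-- 		if addition >= src_len or not (d == src[addition]):
-- 			break
-- 		addition = addition + 1
--
-- 	priority += addition
--
-- 	return priority
-- ===== SOURCE B (Python) =====
-- def _commonLen(xs, ys):
--     if xs and ys and xs[0] == ys[0]:
--         return 1 + _commonLen(xs[1:], ys[1:])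
--     return 0
--
-- def calcPriority(dist_url, src_url):
--     dist = dist_url.split('/')
--     src = src_url.split('/')
--     return len(dist) + _commonLen(dist, src)
-- ===== Notes on version B (the rewrite author's own statement) =====
-- stated objective: simpler
-- what changed: Replaces A's index-counting loop with early break (addition vs src_len bound check and src[addition] lookup) by a structural recursion that walks the two segment lists in lockstep and counts the common prefix, then adds it to len(dist) directly.
import Mathlib
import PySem

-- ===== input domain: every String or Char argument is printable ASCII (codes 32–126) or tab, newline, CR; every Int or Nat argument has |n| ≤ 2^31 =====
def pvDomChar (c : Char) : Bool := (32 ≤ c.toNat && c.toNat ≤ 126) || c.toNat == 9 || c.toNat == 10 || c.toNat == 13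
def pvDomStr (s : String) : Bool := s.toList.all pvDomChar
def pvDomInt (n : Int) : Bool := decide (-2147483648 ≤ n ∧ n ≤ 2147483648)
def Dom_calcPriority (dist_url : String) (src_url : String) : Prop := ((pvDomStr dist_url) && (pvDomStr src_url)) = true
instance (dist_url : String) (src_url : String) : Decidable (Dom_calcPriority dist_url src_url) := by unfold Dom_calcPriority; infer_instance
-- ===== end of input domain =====

-- B replaces A's index-counting break loop by a lockstep structural recursion over the two segment lists (simpler decomposition, same cost).


-- ===== PORT A =====
-- A's for-loop over dist with break, counter 'addition' (Int, as in Python)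
def pvLoopA : List String → List String → Int → Int → Int
  | [], _, _, addition => addition
  | d :: rest, src, src_len, addition =>
    if addition ≥ src_len ∨ ¬ (PySem.List.pyGet? src addition = some d) then addition
    else pvLoopA rest src src_len (addition + 1)

def calcPriority (dist_url : String) (src_url : String) : Int :=
  let dist := (PySem.Str.split? dist_url "/").getD []
  let src := (PySem.Str.split? src_url "/").getD []
  let dist_len : Int := dist.length
  let src_len : Int := src.length
  let priority := dist_len
  let addition := pvLoopA dist src src_len 0
  priority + addition

-- ===== PORT B =====
-- Source B's _commonLen: structural recursion on both lists in lockstep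
def pvCommonLen : List String → List String → Int
  | [], _ => 0
  | _ :: _, [] => 0
  | x :: xs, y :: ys => if x = y then 1 + pvCommonLen xs ys else 0

def calcPriority_alt (dist_url : String) (src_url : String) : Int :=
  let dist := (PySem.Str.split? dist_url "/").getD []
  let src := (PySem.Str.split? src_url "/").getD []
  (dist.length : Int) + pvCommonLen dist src

-- ===== PRECONDITION & SPEC =====
def Spec_calcPriority (dist_url : String) (src_url : String) (out : Int) : Prop := out = calcPriority_alt dist_url src_url
instance (dist_url : String) (src_url : String) (out : Int) : Decidable (Spec_calcPriority dist_url src_url out) := by unfold Spec_calcPriority; infer_instance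

-- ===== CLAIM (what is proved, stated in full; the proofs are below) =====
def Claim_equal_calcPriority : Prop := ∀ (dist_url : String) (src_url : String), Dom_calcPriority dist_url src_url → Spec_calcPriority dist_url src_url (calcPriority dist_url src_url)

-- ===== LEMMAS AND PROOFS =====
theorem pvLoopA_eq (ds : List String) (src : List String) (a : Nat) :
    pvLoopA ds src (src.length : Int) (a : Int) = (a : Int) + pvCommonLen ds (src.drop a) := by
  induction ds generalizing a with
  | nil => simp [pvLoopA, pvCommonLen]
  | cons d rest ih =>
    simp only [pvLoopA]
    split_ifs with h
    · rcases h with h | h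
      · have hd : src.drop a = [] := List.drop_eq_nil_of_le (by exact_mod_cast h)
        simp [hd, pvCommonLen]
      · by_cases hlen : a < src.length
        · have hd : src.drop a = src[a] :: src.drop (a + 1) := List.drop_eq_getElem_cons hlen
          have hget : PySem.List.pyGet? src (a : Int) = some src[a] := by
            simp [PySem.List.pyGet?_natCast, List.getElem?_eq_getElem hlen]
          have hne : ¬ (d = src[a]) := fun hc => h (by rw [hget, hc])
          rw [hd]
          simp [pvCommonLen, hne]
        · have hd : src.drop a = [] := List.drop_eq_nil_of_le (by omega)
          simp [hd, pvCommonLen]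
    · push Not at h
      obtain ⟨h1, h2⟩ := h
      have hlen : a < src.length := by exact_mod_cast h1
      have hget : PySem.List.pyGet? src (a : Int) = some src[a] := by
        simp [PySem.List.pyGet?_natCast, List.getElem?_eq_getElem hlen]
      have heq : d = src[a] := by
        have := h2; rw [hget] at this; exact (Option.some.inj this).symm
      have hcast : ((a : Int) + 1) = ((a + 1 : Nat) : Int) := by push_cast; ring
      have hd : src.drop a = src[a] :: src.drop (a + 1) := List.drop_eq_getElem_cons hlen
      rw [hcast, ih (a + 1), hd]
      simp [pvCommonLen, heq]
      ring

-- ===== VERDICT (by name: the statement is the Claim_ definition above) =====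
theorem calcPriority_spec : Claim_equal_calcPriority := by
  intro dist_url src_url _
  unfold Spec_calcPriority calcPriority calcPriority_alt
  have := pvLoopA_eq ((PySem.Str.split? dist_url "/").getD []) ((PySem.Str.split? src_url "/").getD []) 0
  simp at this
  simp [this]
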